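-- pv_equiv track=rewrite | github.com/alchemixXx/my_echange_repo | Udemy/P_FS/Django-Python-Full-Stack-Web-Devloper-master/Python_Level_One/Part9_Functions_Exercises.py | arrayCheck
-- ===== SOURCE A (Python) =====
-- def arrayCheck(nums):
--     x = False
--     # CODE GOES HERE
--
--     for i in range(0, (len(nums) - 2)):
--         one = nums[i]
--         two = nums[i + 1]
--         three = nums[i + 2]
--         if one == 1 and  two == 2 and three == 3:
--             x = True
--             break
--     return x
-- ===== SOURCE B (Python) =====
-- def arrayCheck(nums):
--     while True:
--         try:
--             i = nums.index(1)
--         except ValueError: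
--             return False
--         if nums[i + 1:i + 3] == [2, 3]:
--             return True
--         nums = nums[i + 1:]
-- ===== Notes on version B (the rewrite author's own statement) =====
-- stated objective: alternative
-- what changed: B jumps from one occurrence of 1 to the next with list.index and compares the bounds-safe slice nums[i+1:i+3] to [2,3], instead of A's triple-indexed scan over every window position.
import Mathlib
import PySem

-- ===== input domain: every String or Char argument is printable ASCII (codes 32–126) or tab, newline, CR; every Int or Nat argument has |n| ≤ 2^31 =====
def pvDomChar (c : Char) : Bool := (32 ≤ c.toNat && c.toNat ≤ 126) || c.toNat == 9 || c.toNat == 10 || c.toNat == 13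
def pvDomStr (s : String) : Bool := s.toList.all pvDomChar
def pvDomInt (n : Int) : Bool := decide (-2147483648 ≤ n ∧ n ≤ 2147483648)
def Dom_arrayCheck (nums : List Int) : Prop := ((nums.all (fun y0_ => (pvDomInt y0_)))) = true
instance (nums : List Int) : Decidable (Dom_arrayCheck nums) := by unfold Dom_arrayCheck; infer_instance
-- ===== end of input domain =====

-- B replaces A's triple-indexed scan over every window position by jumping to each
-- occurrence of 1 with list.index and comparing the bounds-safe slice nums[i+1:i+3]
-- to [2,3] (objective: alternative; same O(n) cost).

-- ===== PORT A =====
-- the for-loop with break; indices i, i+1, i+2 are always in range (i < len-2),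
-- so pyGetD's default 0 is never consulted
def arrayCheckLoop (nums : List Int) : List Int → Bool
  | [] => false
  | i :: rest =>
    let one := PySem.List.pyGetD nums i 0
    let two := PySem.List.pyGetD nums (i + 1) 0
    let three := PySem.List.pyGetD nums (i + 2) 0
    if one = 1 ∧ two = 2 ∧ three = 3 then true
    else arrayCheckLoop nums rest

def arrayCheck (nums : List Int) : Bool :=
  arrayCheckLoop nums (PySem.List.pyRange 0 ((nums.length : Int) - 2) 1)

-- ===== PORT B =====
-- the while-loop, as a fuel recursion (fuel = nums.length bounds the number of
-- iterations, since each iteration drops at least one element)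
def arrayCheckAltLoop : Nat → List Int → Bool
  | 0, _ => false
  | fuel + 1, nums =>
    match PySem.List.index? nums 1 with
    | none => false
    | some i =>
      if PySem.List.slice nums (some ((i : Int) + 1)) (some ((i : Int) + 3)) = [2, 3] then
        true
      else
        arrayCheckAltLoop fuel (PySem.List.slice nums (some ((i : Int) + 1)) none)

def arrayCheck_alt (nums : List Int) : Bool :=
  arrayCheckAltLoop nums.length nums

-- ===== PRECONDITION & SPEC =====
def Spec_arrayCheck (nums : List Int) (out : Bool) : Prop := out = arrayCheck_alt nums
instance (nums : List Int) (out : Bool) : Decidable (Spec_arrayCheck nums out) := by unfold Spec_arrayCheck; infer_instance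

-- ===== CLAIM =====
def Claim_equal_arrayCheck : Prop := ∀ (nums : List Int), Dom_arrayCheck nums → Spec_arrayCheck nums (arrayCheck nums)

-- ===== LEMMAS AND PROOFS =====

-- reference checker: does some suffix start with 1, 2, 3 (a full window)?
def chk : List Int → Bool
  | [] => false
  | a :: l => (decide (a = 1) && decide (l.take 2 = [2, 3])) || chk l

theorem chk_short (l : List Int) (h : l.length < 3) : chk l = false := by
  match l, h with
  | [], _ => rfl
  | [a], _ => simp [chk]
  | [a, b], _ => simp [chk]

theorem chk_of_not_mem (l : List Int) (h : (1 : Int) ∉ l) : chk l = false := by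
  induction l with
  | nil => rfl
  | cons a l ih =>
    simp only [List.mem_cons, not_or] at h
    simp only [chk, ih h.2, Bool.or_false]
    simp only [Bool.and_eq_false_iff, decide_eq_false_iff_not]
    left; exact fun ha => h.1 ha.symm

theorem chk_append (pre l : List Int) (h : (1 : Int) ∉ pre) :
    chk (pre ++ l) = chk l := by
  induction pre with
  | nil => rfl
  | cons a pre ih =>
    simp only [List.mem_cons, not_or] at h
    simp only [List.cons_append, chk, ih h.2]
    have : decide (a = 1) = false := by
      simp only [decide_eq_false_iff_not]; exact fun ha => h.1 ha.symm
    simp [this]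

theorem arrayCheck_alt_eq_chk_aux (n : Nat) :
    ∀ nums : List Int, nums.length ≤ n → arrayCheckAltLoop n nums = chk nums := by
  induction n with
  | zero =>
    intro nums hle
    rw [List.length_eq_zero_iff.mp (Nat.le_zero.mp hle)]
    rfl
  | succ n ih =>
    intro nums hle
    rw [arrayCheckAltLoop]
    cases h : PySem.List.index? nums 1 with
    | none => simp [chk_of_not_mem nums ((PySem.List.index?_eq_none_iff nums 1).mp h)]
    | some i =>
      obtain ⟨pre, suf, hsplit, hlen, hnm⟩ := (PySem.List.index?_eq_some_iff nums 1 i).mp h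
      have hcast1 : ((i : Int) + 1) = ((i + 1 : Nat) : Int) := by push_cast; ring
      have hcast3 : ((i : Int) + 3) = ((i + 1 : Nat) : Int) + ((2 : Nat) : Int) := by push_cast; ring
      have hdrop : nums.drop (i + 1) = suf := by
        rw [hsplit, ← hlen, ← List.drop_drop, List.drop_left]
        rfl
      have hslice : PySem.List.slice nums (some ((i : Int) + 1)) (some ((i : Int) + 3)) = suf.take 2 := by
        rw [hcast1, hcast3, PySem.List.slice_natCast_add, hdrop]
      have hfrom : PySem.List.slice nums (some ((i : Int) + 1)) none = suf := by
        rw [hcast1, PySem.List.slice_from_natCast, hdrop]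
      have hchk : chk nums = (decide (suf.take 2 = [2, 3]) || chk suf) := by
        rw [hsplit, chk_append pre _ hnm]; simp [chk]
      have hsuflen : suf.length ≤ n := by
        have : nums.length = pre.length + suf.length + 1 := by
          subst hsplit; simp only [List.length_append, List.length_cons]; omega
        omega
      simp only [hchk, hslice, hfrom]
      by_cases hc : suf.take 2 = [2, 3]
      · simp [hc]
      · simp [hc, ih suf hsuflen]

theorem arrayCheck_alt_eq_chk (nums : List Int) : arrayCheck_alt nums = chk nums := by
  unfold arrayCheck_alt
  exact arrayCheck_alt_eq_chk_aux nums.length nums (le_refl _)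

theorem take_two_at (l : List Int) (k : Nat) (h : k + 2 < l.length) :
    (l.drop (k + 1)).take 2 = [l[k + 1], l[k + 2]] := by
  have h1 : k + 1 < l.length := by omega
  rw [List.drop_eq_getElem_cons h1,
      List.drop_eq_getElem_cons (show k + 2 < l.length from h)]
  rfl

theorem loop_eq_chk (nums : List Int) (m : Nat) : ∀ k : Nat, nums.length - k ≤ m →
    arrayCheckLoop nums (PySem.List.pyRange (k : Int) ((nums.length : Int) - 2) 1) =
      chk (nums.drop k) := by
  induction m with
  | zero =>
    intro k hk
    have hnil : PySem.List.pyRange (k : Int) ((nums.length : Int) - 2) 1 = [] :=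
      PySem.List.pyRange_one_eq_nil (by omega)
    rw [hnil, chk_short _ (by simp [List.length_drop]; omega)]
    rfl
  | succ m ih =>
    intro k hk
    by_cases hlt : (k : Int) < (nums.length : Int) - 2
    · have hk2 : k + 2 < nums.length := by omega
      rw [PySem.List.pyRange_one_cons hlt]
      have hkc1 : ((k : Int) + 1) = ((k + 1 : Nat) : Int) := by push_cast; ring
      have hkc2 : ((k : Int) + 2) = ((k + 2 : Nat) : Int) := by push_cast; ring
      simp only [arrayCheckLoop, hkc1, hkc2, PySem.List.pyGetD_natCast]
      rw [List.getD_eq_getElem _ _ (by omega), List.getD_eq_getElem _ _ (by omega),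
          List.getD_eq_getElem _ _ hk2]
      rw [List.drop_eq_getElem_cons (show k < nums.length by omega)]
      simp only [chk, take_two_at nums k hk2]
      by_cases hone : nums[k] = 1 ∧ nums[k + 1] = 2 ∧ nums[k + 2] = 3
      · rw [if_pos hone]
        simp [hone.1, hone.2.1, hone.2.2]
      · rw [if_neg hone]
        rw [ih (k + 1) (by omega)]
        have hfalse : (decide (nums[k] = 1) &&
            decide ([nums[k + 1], nums[k + 2]] = [2, 3])) = false := by
          simp only [Bool.and_eq_false_iff, decide_eq_false_iff_not]
          by_cases h1 : nums[k] = 1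
          · right; intro hc; apply hone; simp_all
          · left; exact h1
        rw [hfalse, Bool.false_or]
    · have hnil : PySem.List.pyRange (k : Int) ((nums.length : Int) - 2) 1 = [] :=
        PySem.List.pyRange_one_eq_nil (by omega)
      rw [hnil, chk_short _ (by simp [List.length_drop]; omega)]
      rfl

theorem arrayCheck_eq_chk (nums : List Int) : arrayCheck nums = chk nums := by
  have := loop_eq_chk nums nums.length 0 (by omega)
  simpa [arrayCheck] using this

-- ===== VERDICT =====
theorem arrayCheck_spec : Claim_equal_arrayCheck := by
  intro nums _
  unfold Spec_arrayCheck
  rw [arrayCheck_eq_chk, arrayCheck_alt_eq_chk]
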